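-- pv_equiv track=rewrite | github.com/mirror/calibre | src/calibre/ebooks/mobi/writer.py | decint
-- ===== SOURCE A (Python) =====
-- DECINT_FORWARD = 0
--
-- DECINT_BACKWARD = 1
--
-- def decint(value, direction):
--     # Encode vwi
--     bytes = []
--     while True:
--         b = value & 0x7f
--         value >>= 7
--         bytes.append(b)
--         if value == 0:
--             break
--     if direction == DECINT_FORWARD:
--         bytes[0] |= 0x80
--     elif direction == DECINT_BACKWARD:
--         bytes[-1] |= 0x80
--     return ''.join(chr(b) for b in reversed(bytes))
-- ===== SOURCE B (Python) =====
-- DECINT_FORWARD = 0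
--
-- DECINT_BACKWARD = 1
--
-- def decint(value, direction):
--     # Closed-form group count, build most-significant-first: no accumulate-and-reverse.
--     n = max(1, (value.bit_length() + 6) // 7)
--     groups = [(value >> (7 * i)) & 0x7f for i in reversed(range(n))]
--     if direction == DECINT_FORWARD:
--         groups[-1] |= 0x80
--     elif direction == DECINT_BACKWARD:
--         groups[0] |= 0x80
--     return ''.join(map(chr, groups))
-- ===== Notes on version B (the rewrite author's own statement) =====
-- stated objective: idiomatic
-- what changed: B computes the number of 7-bit groups up front from bit_length and builds the byte string most-significant-first by an indexed shift-and-mask comprehension, instead of A's divide-until-zero accumulation followed by a reversal.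
import Mathlib
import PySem

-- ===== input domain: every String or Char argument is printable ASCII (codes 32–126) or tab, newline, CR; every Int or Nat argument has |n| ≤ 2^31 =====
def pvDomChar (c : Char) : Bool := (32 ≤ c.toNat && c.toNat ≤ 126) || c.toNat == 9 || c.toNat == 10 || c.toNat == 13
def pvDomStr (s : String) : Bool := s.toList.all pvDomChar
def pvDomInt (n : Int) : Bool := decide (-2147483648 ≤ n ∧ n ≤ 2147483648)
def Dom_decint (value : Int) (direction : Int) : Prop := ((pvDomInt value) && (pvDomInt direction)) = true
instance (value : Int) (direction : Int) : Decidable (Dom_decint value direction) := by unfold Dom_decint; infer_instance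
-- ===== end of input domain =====

-- B builds the variable-width integer most-significant-first from a closed-form group count
-- (bit_length) instead of A's accumulate-then-reverse loop; return-value equivalence only.

-- ===== PORT A =====
-- bytes[0] |= 0x80 (in-place mutation of the first element)
def pvOrHead : List Int → List Int
  | [] => []
  | b :: rest => PySem.Int.bor b 0x80 :: rest

-- bytes[-1] |= 0x80 (in-place mutation of the last element)
def pvOrLast (l : List Int) : List Int := (pvOrHead l.reverse).reverse

-- the `while True` loop of A; fuel makes it total (A itself never terminates for value < 0)
def decintLoop (fuel : Nat) (value : Int) (bytes : List Int) : List Int :=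
  match fuel with
  | 0 => bytes
  | f + 1 =>
    let b := PySem.Int.band value 0x7f
    let value' := value >>> (7 : Nat)
    let bytes' := bytes ++ [b]
    if value' = 0 then bytes' else decintLoop f value' bytes'

def decint (value : Int) (direction : Int) : String :=
  let bytes := decintLoop (value.natAbs + 1) value []
  let bytes :=
    if direction = 0 then pvOrHead bytes
    else if direction = 1 then pvOrLast bytes
    else bytes
  String.mk (bytes.reverse.map (fun b => Char.ofNat b.toNat))

-- ===== PORT B =====
def decint_alt (value : Int) (direction : Int) : String :=
  let n : Nat := max 1 ((PySem.Int.bitLength value + 6) / 7)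
  let groups := (List.range n).reverse.map
    (fun i : Nat => PySem.Int.band (value >>> ((7 * i : Nat))) 0x7f)
  let groups :=
    if direction = 0 then pvOrLast groups
    else if direction = 1 then pvOrHead groups
    else groups
  String.mk (groups.map (fun b => Char.ofNat b.toNat))

-- ===== PRECONDITION & SPEC =====
-- A's `while True` loop never terminates for value < 0 (value >>= 7 stabilises at -1,
-- never 0), so Pre_ admits exactly the inputs on which A returns: nonnegative values.
def Pre_decint (value : Int) (direction : Int) : Prop := 0 ≤ value
instance (value : Int) (direction : Int) : Decidable (Pre_decint value direction) := by
  unfold Pre_decint; infer_instance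
def pvWitness_decint : Int × Int := (300, 0)

def Spec_decint (value : Int) (direction : Int) (out : String) : Prop := out = decint_alt value direction
instance (value : Int) (direction : Int) (out : String) : Decidable (Spec_decint value direction out) := by unfold Spec_decint; infer_instance

-- ===== CLAIM (what is proved, stated in full; the proofs are below) =====
def Claim_equal_decint : Prop := ∀ (value : Int) (direction : Int), Dom_decint value direction → Pre_decint value direction → Spec_decint value direction (decint value direction)

-- ===== LEMMAS AND PROOFS =====

-- the list of 7-bit groups of n, least-significant first (what A's loop accumulates)
def lsb (n : Nat) : List Int :=
  ((n % 128 : Nat) : Int) :: (if h : n / 128 = 0 then [] else lsb (n / 128))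
decreasing_by exact Nat.div_lt_self (by omega) (by omega)

lemma band127 (n : Nat) : PySem.Int.band (n : Int) 0x7f = ((n % 128 : Nat) : Int) := by
  rw [show (0x7f : Int) = ((127 : Nat) : Int) from rfl, PySem.Int.band_natCast]
  have h := Nat.and_two_pow_sub_one_eq_mod n 7
  norm_num at h
  rw [h]

lemma shift7 (n : Nat) : ((n : Int) >>> (7 : Nat)) = ((n / 128 : Nat) : Int) := by
  rw [show ((n : Int) >>> (7 : Nat)) = ((n >>> 7 : Nat) : Int) from rfl,
    Nat.shiftRight_eq_div_pow]

lemma shift7k (n : Nat) (k : Nat) : ((n : Int) >>> (7 * k)) = ((n / 128 ^ k : Nat) : Int) := by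
  rw [show ((n : Int) >>> (7 * k)) = ((n >>> (7 * k) : Nat) : Int) from rfl,
    Nat.shiftRight_eq_div_pow, pow_mul]
  norm_num

lemma loopA (f : Nat) : ∀ (n : Nat) (acc : List Int), n < f →
    decintLoop f (n : Int) acc = acc ++ lsb n := by
  induction f with
  | zero => intro n acc h; omega
  | succ f ih =>
    intro n acc _
    rw [decintLoop, lsb]
    simp only [band127, shift7]
    by_cases h0 : n / 128 = 0
    · simp [h0]
    · have hne : ((n / 128 : Nat) : Int) ≠ 0 := by exact_mod_cast h0
      simp only [hne, h0]
      rw [ih (n / 128) _ (by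
        have : n / 128 < n := Nat.div_lt_self (by omega) (by omega)
        omega)]
      simp

-- element form of lsb
lemma lsb_eq_range (n : Nat) :
    lsb n = (List.range (lsb n).length).map (fun i => ((n / 128 ^ i % 128 : Nat) : Int)) := by
  induction n using Nat.strong_induction_on with
  | _ n ih =>
    rw [lsb]
    by_cases h0 : n / 128 = 0
    · simp [h0]
    · have hlt : n / 128 < n := Nat.div_lt_self (by omega) (by omega)
      simp only [h0, dif_neg, not_false_iff]
      have ihh := ih (n / 128) hlt
      rw [List.length_cons, List.range_succ_eq_map]
      simp only [List.map_cons, List.map_map]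
      congr 1
      · simp
      · rw [ihh]
        simp only [List.length_map, List.length_range]
        apply List.map_congr_left
        intro a _
        simp only [Function.comp_apply]
        congr 2
        rw [Nat.div_div_eq_div_mul, pow_succ, Nat.mul_comm]

lemma length_lsb_bounds (n : Nat) :
    1 ≤ (lsb n).length ∧ n < 128 ^ (lsb n).length ∧
      ((lsb n).length = 1 ∨ 128 ^ ((lsb n).length - 1) ≤ n) := by
  induction n using Nat.strong_induction_on with
  | _ n ih =>
    rw [lsb]
    by_cases h0 : n / 128 = 0
    · have : n < 128 := by omega
      simp [h0]; omega
    · have hlt : n / 128 < n := Nat.div_lt_self (by omega) (by omega)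
      obtain ⟨h1, h2, h3⟩ := ih (n / 128) hlt
      simp only [h0, dif_neg, not_false_iff, List.length_cons]
      refine ⟨by omega, ?_, ?_⟩
      · have : n < 128 ^ (lsb (n / 128)).length * 128 := by
          have := Nat.lt_succ_iff.mpr (Nat.le_refl (n / 128))
          calc n < (n / 128 + 1) * 128 := by omega
            _ ≤ 128 ^ (lsb (n / 128)).length * 128 := by
                have : n / 128 + 1 ≤ 128 ^ (lsb (n / 128)).length := h2
                exact Nat.mul_le_mul_right _ this
        calc n < 128 ^ (lsb (n / 128)).length * 128 := this
          _ = 128 ^ ((lsb (n / 128)).length + 1) := by ring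
      · right
        rcases h3 with h3 | h3
        · have : 1 ≤ n / 128 := by omega
          simp [h3]
          calc (128:Nat) = 128 ^ 1 := by ring
            _ ≤ (n/128) * 128 := by omega
            _ ≤ n := Nat.div_mul_le_self n 128
        · have hL : 1 ≤ (lsb (n / 128)).length := h1
          have : 128 ^ ((lsb (n / 128)).length - 1) * 128 ≤ (n / 128) * 128 :=
            Nat.mul_le_mul_right _ h3
          have h128 : 128 ^ ((lsb (n / 128)).length - 1) * 128 = 128 ^ (lsb (n / 128)).length := by
            rw [← pow_succ]; congr 1; omega
          have := Nat.div_mul_le_self n 128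
          simp only [Nat.add_sub_cancel]
          omega

-- the group count B computes equals the length of A's chain
lemma length_lsb_eq (n : Nat) :
    (lsb n).length = max 1 ((PySem.Int.bitLength (n : Int) + 6) / 7) := by
  obtain ⟨hL1, hL2, hL3⟩ := length_lsb_bounds n
  set L := (lsb n).length with hLdef
  set bl := PySem.Int.bitLength (n : Int) with hbl
  set m := max 1 ((bl + 6) / 7) with hm
  have hm1 : 1 ≤ m := Nat.le_max_left _ _
  have hq : (bl + 6) / 7 ≤ m := Nat.le_max_right _ _
  have hdm := Nat.div_add_mod (bl + 6) 7
  have hmod := Nat.mod_lt (bl + 6) (show 0 < 7 by omega)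
  have hble : bl ≤ 7 * m := by omega
  have hn_lt : n < 128 ^ m := by
    have h1 : n < 2 ^ bl := by
      have := PySem.Int.lt_two_pow_bitLength (n : Int)
      simpa using this
    have h2 : (2:Nat) ^ bl ≤ 2 ^ (7 * m) := Nat.pow_le_pow_right (by omega) hble
    have h3 : (2:Nat) ^ (7 * m) = 128 ^ m := by
      rw [pow_mul]; norm_num
    omega
  have hm_low : m = 1 ∨ 128 ^ (m - 1) ≤ n := by
    by_cases hm2 : m = 1
    · exact Or.inl hm2
    · right
      have hq2 : (bl + 6) / 7 = m := by
        rcases max_choice 1 ((bl + 6) / 7) with hc | hc <;> omega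
      have hmul := Nat.div_mul_le_self (bl + 6) 7
      have hbl_ge : 7 * m - 6 ≤ bl := by
        have : ((bl + 6) / 7) * 7 ≤ bl + 6 := hmul
        omega
      have hbl_pos : 1 ≤ bl := by omega
      have hn0 : (n : Int) ≠ 0 := by
        intro h0
        rw [h0] at hbl
        simp [PySem.Int.bitLength_zero] at hbl
        omega
      have hlow := PySem.Int.two_pow_bitLength_le (n : Int) hn0
      have hlow' : 2 ^ (bl - 1) ≤ n := by simpa using hlow
      have hexp : 7 * (m - 1) ≤ bl - 1 := by omega
      calc (128:Nat) ^ (m - 1) = 2 ^ (7 * (m - 1)) := by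
            rw [pow_mul]; norm_num
        _ ≤ 2 ^ (bl - 1) := Nat.pow_le_pow_right (by omega) hexp
        _ ≤ n := hlow'
  -- uniqueness of the group count
  by_contra hne
  rcases Nat.lt_or_ge L m with hlt | hge
  · rcases hm_low with h1 | h1
    · omega
    · have : 128 ^ (m - 1) < 128 ^ L := by omega
      have := (Nat.pow_lt_pow_iff_right (by omega : 1 < 128)).mp this
      omega
  · have hlt : m < L := by omega
    rcases hL3 with h1 | h1
    · omega
    · have : 128 ^ (L - 1) < 128 ^ m := by omega
      have := (Nat.pow_lt_pow_iff_right (by omega : 1 < 128)).mp this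
      omega

theorem decint_eq (value direction : Int) (h : 0 ≤ value) :
    decint value direction = decint_alt value direction := by
  obtain ⟨n, rfl⟩ : ∃ n : Nat, value = (n : Int) := ⟨value.toNat, (Int.toNat_of_nonneg h).symm⟩
  have hgroups : (List.range (max 1 ((PySem.Int.bitLength (n:Int) + 6) / 7))).reverse.map
      (fun i : Nat => PySem.Int.band ((n:Int) >>> ((7 * i : Nat))) 0x7f) = (lsb n).reverse := by
    rw [List.map_reverse, ← length_lsb_eq]
    congr 1
    conv_rhs => rw [lsb_eq_range n]
    apply List.map_congr_left
    intro a _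
    rw [shift7k, band127]
  simp only [decint, decint_alt, Int.natAbs_natCast,
    loopA (n + 1) n [] (Nat.lt_succ_self n), hgroups, List.nil_append]
  by_cases h0 : direction = 0
  · simp [h0, pvOrLast, List.reverse_reverse]
  · by_cases h1 : direction = 1
    · simp [h0, h1, pvOrLast, List.reverse_reverse]
    · simp [h0, h1]

-- ===== VERDICT (by name: the statement is the Claim_ definition above) =====
theorem decint_spec : Claim_equal_decint := by
  intro value direction _ hpre
  unfold Spec_decint
  exact decint_eq value direction hpre
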